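-- pv_equiv track=rewrite | github.com/ditrungduong/OSU- | Row Puzzle/maze_runner.py | find_gold
-- ===== SOURCE A (Python) =====
-- def find_gold(maze, position):
--     """
--     maze is a list of lists that represents a square maze
--     ' ' is an empty square
--     '#' is a wall
--     'G' is where the gold is hidden
--     position is a tuple of the current row and column
--
--     returns a list of coordinates that leads to the gold
--     """
--     row_index, col_index = position  # tuple unpacking
--     if row_index < 0 or row_index >= len(maze):  # base case for row out of bounds
--         return None
--     if col_index < 0 or col_index >= len(maze[row_index]):  # base case for column out of bounds
--         return None
--     if maze[row_index][col_index] == '#':  # base case for hitting a wall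
--         return None
--     if maze[row_index][col_index] == '.':  # base case for repeating a position
--         return None
--     if maze[row_index][col_index] == 'G':  # base case for finding the goal
--         return [(row_index, col_index)]
--
--     maze[row_index][col_index] = '.'  # mark current square to avoid revisiting
--     partial_route = find_gold(maze, (row_index-1, col_index))  # try "up"
--     if partial_route is not None:
--         maze[row_index][col_index] = ' '  # unmark current square
--         return [(row_index, col_index)] + partial_route
--     partial_route = find_gold(maze, (row_index+1, col_index))  # try "down"
--     if partial_route is not None:
--         maze[row_index][col_index] = ' '  # unmark current square
--         return [(row_index, col_index)] + partial_route
--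
--
--
--     partial_route = find_gold(maze, (row_index, col_index-1))  # try "left"
--     if partial_route is not None:
--         maze[row_index][col_index] = ' '  # unmark current square
--         return [(row_index, col_index)] + partial_route
--
--
--     partial_route = find_gold(maze, (row_index, col_index+1))  # try "right"
--     if partial_route is not None:
--         maze[row_index][col_index] = ' '  # unmark current square
--         return [(row_index, col_index)] + partial_route
--     maze[row_index][col_index] = ' '  # unmark current square
-- ===== SOURCE B (Python) =====
-- DIRS = ((-1, 0), (1, 0), (0, -1), (0, 1))
--
--
-- def find_gold(maze, position):
--     """Iterative DFS with an explicit stack of direction indices instead of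
--     recursion; the maze is never modified (the current path list itself serves
--     as the set of marked squares)."""
--     r, c = position
--     if r < 0 or r >= len(maze):
--         return None
--     if c < 0 or c >= len(maze[r]):
--         return None
--     cell = maze[r][c]
--     if cell == '#' or cell == '.':
--         return None
--     if cell == 'G':
--         return [(r, c)]
--     path = [(r, c)]
--     stack = [0]  # stack[k] = next direction index to try from path[k]
--     while stack:
--         i = stack[-1]
--         if i == 4:  # this square is exhausted: backtrack
--             stack.pop()
--             path.pop()
--             continue
--         stack[-1] = i + 1
--         r, c = path[-1]
--         nr, nc = r + DIRS[i][0], c + DIRS[i][1]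
--         if nr < 0 or nr >= len(maze):
--             continue
--         if nc < 0 or nc >= len(maze[nr]):
--             continue
--         cell = maze[nr][nc]
--         if cell == '#' or cell == '.' or (nr, nc) in path:
--             continue
--         if cell == 'G':
--             return path + [(nr, nc)]
--         path.append((nr, nc))
--         stack.append(0)
--     return None
-- ===== Notes on version B (the rewrite author's own statement) =====
-- stated objective: alternative
-- what changed: B replaces A's recursive backtracking with in-place '.'-marking/' '-unmarking of the maze by an iterative DFS: a while loop over an explicit stack of direction indices and a path list that itself serves as the marked set; B never modifies the maze.
import Mathlib
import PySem

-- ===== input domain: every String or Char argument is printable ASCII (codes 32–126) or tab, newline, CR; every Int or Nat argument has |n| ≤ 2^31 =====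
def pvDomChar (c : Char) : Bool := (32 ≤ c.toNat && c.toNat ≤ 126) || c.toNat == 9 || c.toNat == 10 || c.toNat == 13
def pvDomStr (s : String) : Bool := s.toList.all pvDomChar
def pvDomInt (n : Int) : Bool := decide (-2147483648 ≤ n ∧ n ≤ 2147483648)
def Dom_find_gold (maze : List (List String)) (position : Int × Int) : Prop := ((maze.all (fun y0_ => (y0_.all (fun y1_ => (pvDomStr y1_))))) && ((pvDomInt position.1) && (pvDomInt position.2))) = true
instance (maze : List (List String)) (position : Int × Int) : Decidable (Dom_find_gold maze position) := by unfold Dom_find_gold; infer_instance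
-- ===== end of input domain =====

-- B replaces A's recursion and in-place maze marking by an iterative DFS over an explicit
-- stack of direction indices; equivalence is about the RETURN value only: Python A mutates
-- the maze in place (visited free squares become ' '), B never modifies it.

-- ===== PORT A =====
-- A mutates maze[r][c]; the port threads the maze state through the recursion and
-- returns (result, mutated maze).  Recursion depth is bounded by the number of cells
-- (each non-base level marks a fresh cell '.'), so fuel = #cells + 2 is a pure guard.
def pvSet2 (m : List (List String)) (i j : Nat) (v : String) : List (List String) :=
  m.set i ((m.getD i []).set j v)

def pvFgA : Nat → List (List String) → Int → Int → (Option (List (Int × Int)) × List (List String))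
  | 0, m, _, _ => (none, m)
  | Nat.succ fuel, m, r, c =>
    if r < 0 ∨ (m.length : Int) ≤ r then (none, m) else
    if c < 0 ∨ (((m.getD r.toNat []).length : Int)) ≤ c then (none, m) else
    let cell := (m.getD r.toNat []).getD c.toNat ""
    if cell = "#" then (none, m) else
    if cell = "." then (none, m) else
    if cell = "G" then (some [(r, c)], m) else
    let m1 := pvSet2 m r.toNat c.toNat "."
    match pvFgA fuel m1 (r - 1) c with                                -- try "up"
    | (some p, m') => (some ((r, c) :: p), pvSet2 m' r.toNat c.toNat " ")
    | (none, m2) =>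
      match pvFgA fuel m2 (r + 1) c with                              -- try "down"
      | (some p, m') => (some ((r, c) :: p), pvSet2 m' r.toNat c.toNat " ")
      | (none, m3) =>
        match pvFgA fuel m3 r (c - 1) with                            -- try "left"
        | (some p, m') => (some ((r, c) :: p), pvSet2 m' r.toNat c.toNat " ")
        | (none, m4) =>
          match pvFgA fuel m4 r (c + 1) with                          -- try "right"
          | (some p, m') => (some ((r, c) :: p), pvSet2 m' r.toNat c.toNat " ")
          | (none, m5) => (none, pvSet2 m5 r.toNat c.toNat " ")

def find_gold (maze : List (List String)) (position : Int × Int) : Option (List (Int × Int)) :=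
  (pvFgA ((maze.map List.length).sum + 2) maze position.1 position.2).1

-- ===== PORT B =====
def pvDirs : List (Int × Int) := [(-1, 0), (1, 0), (0, -1), (0, 1)]

-- The while loop, as fuel recursion.  The Python lists path/stack grow at the END;
-- here rpath/rstack hold them TOP-FIRST (head = path[-1] / stack[-1]), so the
-- returned route is rpath.reverse.  The fuel 5*6^(#cells+1) bounds the iteration
-- count (proved below); Python's loop has no fuel, it simply terminates.
def pvLoop (maze : List (List String)) : Nat → List (Int × Int) → List Nat → Option (List (Int × Int))
  | 0, _, _ => none
  | Nat.succ _, _, [] => none                     -- while stack: exhausted → return None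
  | Nat.succ _, [], _ :: _ => none                -- unreachable: path and stack move together
  | Nat.succ fuel, (r, c) :: ps, i :: is =>
    if i = 4 then pvLoop maze fuel ps is          -- square exhausted: backtrack (pop both)
    else
      -- nr, nc = r + DIRS[i][0], c + DIRS[i][1]  (written inline)
      if r + (pvDirs.getD i (0, 0)).1 < 0 ∨ (maze.length : Int) ≤ r + (pvDirs.getD i (0, 0)).1 then
        pvLoop maze fuel ((r, c) :: ps) ((i + 1) :: is)
      else if c + (pvDirs.getD i (0, 0)).2 < 0 ∨
          ((maze.getD (r + (pvDirs.getD i (0, 0)).1).toNat []).length : Int) ≤ c + (pvDirs.getD i (0, 0)).2 then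
        pvLoop maze fuel ((r, c) :: ps) ((i + 1) :: is)
      else if (maze.getD (r + (pvDirs.getD i (0, 0)).1).toNat []).getD (c + (pvDirs.getD i (0, 0)).2).toNat "" = "#" ∨
          (maze.getD (r + (pvDirs.getD i (0, 0)).1).toNat []).getD (c + (pvDirs.getD i (0, 0)).2).toNat "" = "." ∨
          (r + (pvDirs.getD i (0, 0)).1, c + (pvDirs.getD i (0, 0)).2) ∈ (r, c) :: ps then
        pvLoop maze fuel ((r, c) :: ps) ((i + 1) :: is)
      else if (maze.getD (r + (pvDirs.getD i (0, 0)).1).toNat []).getD (c + (pvDirs.getD i (0, 0)).2).toNat "" = "G" then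
        some (((r, c) :: ps).reverse ++ [(r + (pvDirs.getD i (0, 0)).1, c + (pvDirs.getD i (0, 0)).2)])
      else
        pvLoop maze fuel ((r + (pvDirs.getD i (0, 0)).1, c + (pvDirs.getD i (0, 0)).2) :: (r, c) :: ps) (0 :: (i + 1) :: is)

def find_gold_alt (maze : List (List String)) (position : Int × Int) : Option (List (Int × Int)) :=
  let r := position.1
  let c := position.2
  if r < 0 ∨ (maze.length : Int) ≤ r then none
  else if c < 0 ∨ ((maze.getD r.toNat []).length : Int) ≤ c then none
  else
    let cell := (maze.getD r.toNat []).getD c.toNat ""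
    if cell = "#" ∨ cell = "." then none
    else if cell = "G" then some [(r, c)]
    else pvLoop maze (5 * 6 ^ ((maze.map List.length).sum + 1)) [(r, c)] [0]

-- ===== PRECONDITION & SPEC =====
def Spec_find_gold (maze : List (List String)) (position : Int × Int) (out : Option (List (Int × Int))) : Prop := out = find_gold_alt maze position
instance (maze : List (List String)) (position : Int × Int) (out : Option (List (Int × Int))) : Decidable (Spec_find_gold maze position out) := by unfold Spec_find_gold; infer_instance

-- ===== CLAIM (what is proved, stated in full; the proofs are below) =====
def Claim_equal_find_gold : Prop := ∀ (maze : List (List String)) (position : Int × Int), Dom_find_gold maze position → Spec_find_gold maze position (find_gold maze position)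

-- ===== LEMMAS AND PROOFS =====

-- Pure reference DFS (proof-only): recursion over the path list, exactly the shared
-- search order of both programs.  Both ports are proved equal to it.
def pvFgB : Nat → List (List String) → List (Int × Int) → Int → Int → Option (List (Int × Int))
  | 0, _, _, _, _ => none
  | Nat.succ fuel, m, path, r, c =>
    if r < 0 ∨ (m.length : Int) ≤ r then none else
    if c < 0 ∨ (((m.getD r.toNat []).length : Int)) ≤ c then none else
    let cell := (m.getD r.toNat []).getD c.toNat ""
    if cell = "#" ∨ cell = "." ∨ (r, c) ∈ path then none
    else if cell = "G" then some [(r, c)]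
    else
      (pvDirs.findSome? fun d => pvFgB fuel m ((r, c) :: path) (r + d.1) (c + d.2)).map
        (fun sub => (r, c) :: sub)

-- classification of a cell: 0 wall '#', 1 mark '.', 2 gold 'G', 3 anything else (traversable)
def pvCat (s : String) : Nat := if s = "#" then 0 else if s = "." then 1 else if s = "G" then 2 else 3

-- simulation relation: mA is A's (mutated) maze, m0 the original, P the current path.
-- Cells on P are marked '.' in mA and traversable in m0; every other cell has the same
-- category in both (A turns explored cells into ' ', which stays traversable).
def pvR (mA m0 : List (List String)) (P : List (Int × Int)) : Prop :=
  mA.length = m0.length ∧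
  (∀ i : Nat, (mA.getD i []).length = (m0.getD i []).length) ∧
  (∀ i j : Nat, i < m0.length → j < (m0.getD i []).length →
    (if ((i : Int), (j : Int)) ∈ P then
      (mA.getD i []).getD j "" = "." ∧ pvCat ((m0.getD i []).getD j "") = 3
     else pvCat ((mA.getD i []).getD j "") = pvCat ((m0.getD i []).getD j "")))

theorem pvSet2_length (m : List (List String)) (i j : Nat) (v : String) :
    (pvSet2 m i j v).length = m.length := by simp [pvSet2]

theorem pvSet2_row (m : List (List String)) (i j : Nat) (v : String) (i' : Nat) :
    (pvSet2 m i j v).getD i' [] =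
      if i' = i ∧ i < m.length then (m.getD i []).set j v else m.getD i' [] := by
  simp only [pvSet2, List.getD_eq_getElem?_getD, List.getElem?_set]
  split_ifs <;> simp_all

theorem pvSet_getD (l : List String) (j : Nat) (v : String) (j' : Nat) :
    (l.set j v).getD j' "" = if j' = j ∧ j < l.length then v else l.getD j' "" := by
  simp only [List.getD_eq_getElem?_getD, List.getElem?_set]
  split_ifs <;> simp_all

-- pvR is preserved by writing v at in-bounds (i,j) when the new path list Q agrees with P
-- away from (i,j) and the cell condition is re-established at (i,j).
theorem pvR_set (mA m0 : List (List String)) (P Q : List (Int × Int)) (i j : Nat) (v : String)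
    (h : pvR mA m0 P) (hi : i < m0.length) (hj : j < (m0.getD i []).length)
    (hQP : ∀ i' j' : Nat, ¬ (i' = i ∧ j' = j) →
      ((((i' : Int), (j' : Int)) ∈ Q) ↔ (((i' : Int), (j' : Int)) ∈ P)))
    (hcond : if ((i : Int), (j : Int)) ∈ Q then
        v = "." ∧ pvCat ((m0.getD i []).getD j "") = 3
      else pvCat v = pvCat ((m0.getD i []).getD j "")) :
    pvR (pvSet2 mA i j v) m0 Q := by
  obtain ⟨h1, h2, h3⟩ := h
  have hiA : i < mA.length := by omega
  have hjA : j < (mA.getD i []).length := by rw [h2 i]; exact hj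
  refine ⟨by rw [pvSet2_length, h1], ?_, ?_⟩
  · intro i'
    rw [pvSet2_row]
    split_ifs with hh
    · rw [List.length_set, hh.1]; exact h2 i
    · exact h2 i'
  · intro i' j' hi' hj'
    rw [pvSet2_row]
    by_cases hij : i' = i ∧ j' = j
    · obtain ⟨rfl, rfl⟩ := hij
      rw [if_pos (And.intro rfl hiA), pvSet_getD, if_pos (And.intro rfl hjA)]
      split_ifs with hm
      · rw [if_pos hm] at hcond; exact hcond
      · rw [if_neg hm] at hcond; exact hcond
    · have hmem := hQP i' j' hij
      have hcell := h3 i' j' hi' hj'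
      have hgoal : (if i' = i ∧ i < mA.length then (mA.getD i []).set j v else mA.getD i' []).getD j' ""
          = (mA.getD i' []).getD j' "" := by
        split_ifs with hh
        · obtain ⟨rfl, _⟩ := hh
          rw [pvSet_getD, if_neg (by tauto)]
        · rfl
      rw [hgoal]
      split_ifs with hm
      · rw [if_pos (hmem.mp hm)] at hcell; exact hcell
      · rw [if_neg (fun hp => hm (hmem.mpr hp))] at hcell; exact hcell

theorem pvCoord_eq (i j i' j' : Nat) :
    (((i' : Int), (j' : Int)) = ((i : Int), (j : Int))) ↔ (i' = i ∧ j' = j) := by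
  simp [Prod.ext_iff]

theorem pvR_mark (mA m0 : List (List String)) (P : List (Int × Int)) (i j : Nat)
    (h : pvR mA m0 P) (hi : i < m0.length) (hj : j < (m0.getD i []).length)
    (_hni : ((i : Int), (j : Int)) ∉ P) (hf : pvCat ((m0.getD i []).getD j "") = 3) :
    pvR (pvSet2 mA i j ".") m0 (((i : Int), (j : Int)) :: P) := by
  refine pvR_set mA m0 P _ i j "." h hi hj ?_ ?_
  · intro i' j' hne
    simp only [List.mem_cons, pvCoord_eq]
    tauto
  · rw [if_pos (List.mem_cons_self)]
    exact ⟨rfl, hf⟩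

theorem pvR_unmark (mA m0 : List (List String)) (P : List (Int × Int)) (i j : Nat)
    (h : pvR mA m0 (((i : Int), (j : Int)) :: P)) (hi : i < m0.length)
    (hj : j < (m0.getD i []).length)
    (hni : ((i : Int), (j : Int)) ∉ P) (hf : pvCat ((m0.getD i []).getD j "") = 3) :
    pvR (pvSet2 mA i j " ") m0 P := by
  refine pvR_set mA m0 _ P i j " " h hi hj ?_ ?_
  · intro i' j' hne
    simp only [List.mem_cons, pvCoord_eq]
    tauto
  · rw [if_neg hni, hf]
    decide

theorem pvCat_wall {s t : String} (h : pvCat s = pvCat t) : s = "#" ↔ t = "#" := by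
  unfold pvCat at h; split_ifs at h <;> simp_all
theorem pvCat_dot {s t : String} (h : pvCat s = pvCat t) : s = "." ↔ t = "." := by
  unfold pvCat at h; split_ifs at h <;> simp_all
theorem pvCat_gold {s t : String} (h : pvCat s = pvCat t) : s = "G" ↔ t = "G" := by
  unfold pvCat at h; split_ifs at h <;> simp_all
theorem pvCat_free {s : String} (h1 : s ≠ "#") (h2 : s ≠ ".") (h3 : s ≠ "G") : pvCat s = 3 := by
  unfold pvCat; split_ifs <;> simp_all

theorem pvMain : ∀ (fuel : Nat) (mA m0 : List (List String)) (P : List (Int × Int)) (r c : Int),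
    pvR mA m0 P →
    (pvFgA fuel mA r c).1 = pvFgB fuel m0 P r c ∧ pvR (pvFgA fuel mA r c).2 m0 P := by
  intro fuel
  induction fuel with
  | zero => intro mA m0 P r c h; exact ⟨rfl, h⟩
  | succ fuel ih =>
    intro mA m0 P r c h
    have hL := h.1
    have hRow := h.2.1
    by_cases hr : r < 0 ∨ (m0.length : Int) ≤ r
    · have hrA : r < 0 ∨ (mA.length : Int) ≤ r := by rw [hL]; exact hr
      simp only [pvFgA, pvFgB, if_pos hrA, if_pos hr]
      exact ⟨by trivial, h⟩
    · have hrA : ¬ (r < 0 ∨ (mA.length : Int) ≤ r) := by rw [hL]; exact hr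
      by_cases hc : c < 0 ∨ ((m0.getD r.toNat []).length : Int) ≤ c
      · have hcA : c < 0 ∨ ((mA.getD r.toNat []).length : Int) ≤ c := by
          rw [hRow r.toNat]; exact hc
        simp only [pvFgA, pvFgB, if_neg hrA, if_neg hr, if_pos hcA, if_pos hc]
        exact ⟨by trivial, h⟩
      · have hcA : ¬ (c < 0 ∨ ((mA.getD r.toNat []).length : Int) ≤ c) := by
          rw [hRow r.toNat]; exact hc
        have hi : r.toNat < m0.length := by omega
        have hj : c.toNat < (m0.getD r.toNat []).length := by omega
        have hri : ((r.toNat : Nat) : Int) = r := by omega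
        have hcj : ((c.toNat : Nat) : Int) = c := by omega
        have hcell := h.2.2 r.toNat c.toNat hi hj
        rw [hri, hcj] at hcell
        by_cases hmem : (r, c) ∈ P
        · rw [if_pos hmem] at hcell
          have haD : (mA.getD r.toNat []).getD c.toNat "" = "." := hcell.1
          have hne1 : ¬ (mA.getD r.toNat []).getD c.toNat "" = "#" := by rw [haD]; decide
          simp only [pvFgA, pvFgB, if_neg hrA, if_neg hr, if_neg hcA, if_neg hc]
          rw [if_neg hne1, if_pos haD, if_pos (show (m0.getD r.toNat []).getD c.toNat "" = "#" ∨
                (m0.getD r.toNat []).getD c.toNat "" = "." ∨ (r, c) ∈ P from Or.inr (Or.inr hmem))]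
          exact ⟨rfl, h⟩
        · rw [if_neg hmem] at hcell
          by_cases hw : (m0.getD r.toNat []).getD c.toNat "" = "#"
          · have haw : (mA.getD r.toNat []).getD c.toNat "" = "#" := (pvCat_wall hcell).mpr hw
            simp only [pvFgA, pvFgB, if_neg hrA, if_neg hr, if_neg hcA, if_neg hc]
            rw [if_pos haw, if_pos (Or.inl hw)]
            exact ⟨rfl, h⟩
          · by_cases hd : (m0.getD r.toNat []).getD c.toNat "" = "."
            · have had : (mA.getD r.toNat []).getD c.toNat "" = "." := (pvCat_dot hcell).mpr hd
              have hne1 : ¬ (mA.getD r.toNat []).getD c.toNat "" = "#" := by rw [had]; decide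
              simp only [pvFgA, pvFgB, if_neg hrA, if_neg hr, if_neg hcA, if_neg hc]
              rw [if_neg hne1, if_pos had, if_pos (Or.inr (Or.inl hd))]
              exact ⟨rfl, h⟩
            · by_cases hg : (m0.getD r.toNat []).getD c.toNat "" = "G"
              · have hag : (mA.getD r.toNat []).getD c.toNat "" = "G" := (pvCat_gold hcell).mpr hg
                have hne1 : ¬ (mA.getD r.toNat []).getD c.toNat "" = "#" := by rw [hag]; decide
                have hne2 : ¬ (mA.getD r.toNat []).getD c.toNat "" = "." := by rw [hag]; decide
                simp only [pvFgA, pvFgB, if_neg hrA, if_neg hr, if_neg hcA, if_neg hc]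
                rw [if_neg hne1, if_neg hne2, if_pos hag,
                    if_neg (show ¬ ((m0.getD r.toNat []).getD c.toNat "" = "#" ∨
                      (m0.getD r.toNat []).getD c.toNat "" = "." ∨ (r, c) ∈ P) by
                      rintro (hh | hh | hh)
                      · exact hw hh
                      · exact hd hh
                      · exact hmem hh),
                    if_pos hg]
                exact ⟨rfl, h⟩
              · -- traversable cell: A marks the cell '.', B extends the path; four directions
                have haw : ¬ (mA.getD r.toNat []).getD c.toNat "" = "#" :=
                  fun hh => hw ((pvCat_wall hcell).mp hh)
                have had : ¬ (mA.getD r.toNat []).getD c.toNat "" = "." :=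
                  fun hh => hd ((pvCat_dot hcell).mp hh)
                have hag : ¬ (mA.getD r.toNat []).getD c.toNat "" = "G" :=
                  fun hh => hg ((pvCat_gold hcell).mp hh)
                have hf0 : pvCat ((m0.getD r.toNat []).getD c.toNat "") = 3 := pvCat_free hw hd hg
                have hniP : ((r.toNat : Int), (c.toNat : Int)) ∉ P := by rw [hri, hcj]; exact hmem
                have hR1 : pvR (pvSet2 mA r.toNat c.toNat ".") m0 ((r, c) :: P) := by
                  rw [← hri, ← hcj]
                  exact pvR_mark mA m0 P r.toNat c.toNat h hi hj hniP hf0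
                simp only [pvFgA, pvFgB, if_neg hrA, if_neg hr, if_neg hcA, if_neg hc]
                rw [if_neg haw, if_neg had, if_neg hag,
                    if_neg (show ¬ ((m0.getD r.toNat []).getD c.toNat "" = "#" ∨
                      (m0.getD r.toNat []).getD c.toNat "" = "." ∨ (r, c) ∈ P) by tauto),
                    if_neg hg]
                simp only [pvDirs, List.findSome?]
                have e1' : r + (-1 : Int) = r - 1 := by ring
                have e2' : c + (0 : Int) = c := by ring
                have e3' : r + (0 : Int) = r := by ring
                have e4' : c + (-1 : Int) = c - 1 := by ring
                rw [e1', e2', e3', e4']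
                -- direction 1: up
                rcases hA1 : pvFgA fuel (pvSet2 mA r.toNat c.toNat ".") (r - 1) c with ⟨o1, m2⟩
                obtain ⟨e1, hRa⟩ := ih (pvSet2 mA r.toNat c.toNat ".") m0 ((r, c) :: P) (r - 1) c hR1
                rw [hA1] at e1 hRa
                dsimp only at e1 hRa ⊢
                rw [← e1]
                cases o1 with
                | some p =>
                  dsimp only
                  refine ⟨rfl, ?_⟩
                  rw [← hri, ← hcj]
                  exact pvR_unmark _ m0 P r.toNat c.toNat (by rw [hri, hcj]; exact hRa) hi hj hniP hf0
                | none =>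
                  dsimp only
                  -- direction 2: down
                  rcases hA2 : pvFgA fuel m2 (r + 1) c with ⟨o2, m3⟩
                  obtain ⟨e2, hRb⟩ := ih m2 m0 ((r, c) :: P) (r + 1) c hRa
                  rw [hA2] at e2 hRb
                  dsimp only at e2 hRb ⊢
                  rw [← e2]
                  cases o2 with
                  | some p =>
                    dsimp only
                    refine ⟨rfl, ?_⟩
                    rw [← hri, ← hcj]
                    exact pvR_unmark _ m0 P r.toNat c.toNat (by rw [hri, hcj]; exact hRb) hi hj hniP hf0
                  | none =>
                    dsimp only
                    -- direction 3: left
                    rcases hA3 : pvFgA fuel m3 r (c - 1) with ⟨o3, m4⟩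
                    obtain ⟨e3, hRc⟩ := ih m3 m0 ((r, c) :: P) r (c - 1) hRb
                    rw [hA3] at e3 hRc
                    dsimp only at e3 hRc ⊢
                    rw [← e3]
                    cases o3 with
                    | some p =>
                      dsimp only
                      refine ⟨rfl, ?_⟩
                      rw [← hri, ← hcj]
                      exact pvR_unmark _ m0 P r.toNat c.toNat (by rw [hri, hcj]; exact hRc) hi hj hniP hf0
                    | none =>
                      dsimp only
                      -- direction 4: right
                      rcases hA4 : pvFgA fuel m4 r (c + 1) with ⟨o4, m5⟩
                      obtain ⟨e4, hRd⟩ := ih m4 m0 ((r, c) :: P) r (c + 1) hRc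
                      rw [hA4] at e4 hRd
                      dsimp only at e4 hRd ⊢
                      rw [← e4]
                      cases o4 with
                      | some p =>
                        dsimp only
                        refine ⟨rfl, ?_⟩
                        rw [← hri, ← hcj]
                        exact pvR_unmark _ m0 P r.toNat c.toNat (by rw [hri, hcj]; exact hRd) hi hj hniP hf0
                      | none =>
                        dsimp only
                        refine ⟨rfl, ?_⟩
                        rw [← hri, ← hcj]
                        exact pvR_unmark _ m0 P r.toNat c.toNat (by rw [hri, hcj]; exact hRd) hi hj hniP hf0

theorem pvR_refl (m : List (List String)) : pvR m m [] := by
  refine ⟨rfl, fun _ => rfl, fun i j _ _ => ?_⟩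
  simp

-- ========== machine (port B) = reference ==========

-- exact iteration count of the machine while scanning directions j..: kb F j, F = depth fuel
def kb : Nat → Nat → Nat
  | _, 0 => 1
  | 0, Nat.succ j => 1 + kb 0 j
  | Nat.succ F, Nat.succ j => 1 + kb F 4 + kb (Nat.succ F) j
  termination_by F j => (F, j)

theorem kb_pos (F j : Nat) : 1 ≤ kb F j := by
  cases j with
  | zero => simp [kb]
  | succ j => cases F <;> simp [kb] <;> omega

theorem kb_step (F j : Nat) : 1 + kb F j ≤ kb F (j + 1) := by
  cases F <;> simp [kb] <;> omega

theorem kb_zero_eq (j : Nat) : kb 0 j = j + 1 := by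
  induction j with
  | zero => simp [kb]
  | succ j ih => simp [kb, ih]; omega

theorem kb_le (F : Nat) : ∀ j : Nat, kb F j ≤ (j + 1) * 6 ^ F := by
  induction F with
  | zero => intro j; rw [kb_zero_eq]; simp
  | succ F ihF =>
    intro j
    induction j with
    | zero => simp [kb]; exact Nat.one_le_pow _ _ (by norm_num)
    | succ j ihj =>
      have h4 := ihF 4
      have h1 : 1 ≤ 6 ^ F := Nat.one_le_pow _ _ (by norm_num)
      have : kb (F + 1) (j + 1) = 1 + kb F 4 + kb (F + 1) j := by simp [kb]
      rw [this]
      have hp : (6 : Nat) ^ (F + 1) = 6 * 6 ^ F := by ring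
      rw [hp] at ihj ⊢
      nlinarith

-- machine invariant: path cells are pairwise distinct and in bounds
def pvInv (maze : List (List String)) (P : List (Int × Int)) : Prop :=
  P.Nodup ∧ ∀ p ∈ P, 0 ≤ p.1 ∧ p.1 < (maze.length : Int) ∧ 0 ≤ p.2 ∧
    p.2 < ((maze.getD p.1.toNat []).length : Int)

def pvAllCells (maze : List (List String)) : List (Int × Int) :=
  (List.range maze.length).flatMap
    (fun i => (List.range ((maze.getD i []).length)).map (fun j => ((i : Int), (j : Int))))

theorem pvAllCells_length (maze : List (List String)) :
    (pvAllCells maze).length = (maze.map List.length).sum := by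
  induction maze with
  | nil => simp [pvAllCells]
  | cons row rows ih =>
    simp only [pvAllCells, List.length_cons, List.range_succ_eq_map, List.flatMap_cons,
      List.flatMap_map, List.length_append, List.length_flatMap] at *
    simp_all [Function.comp]

theorem pvMem_allCells (maze : List (List String)) (r c : Int)
    (h1 : 0 ≤ r) (h2 : r < (maze.length : Int)) (h3 : 0 ≤ c)
    (h4 : c < ((maze.getD r.toNat []).length : Int)) : (r, c) ∈ pvAllCells maze := by
  simp only [pvAllCells, List.mem_flatMap, List.mem_range, List.mem_map]
  refine ⟨r.toNat, by omega, c.toNat, ?_, ?_⟩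
  · simp only [List.pure_def, List.bind_eq_flatMap]
    simp only [List.getD_eq_getElem?_getD] at h4
    simp
    exact ⟨c.toNat, by omega, by omega⟩
  · rw [Prod.ext_iff]
    exact ⟨Int.toNat_of_nonneg h1, Int.toNat_of_nonneg h3⟩

theorem pvInv_length (maze : List (List String)) (P : List (Int × Int)) (h : pvInv maze P) :
    P.length ≤ (maze.map List.length).sum := by
  obtain ⟨hnd, hb⟩ := h
  have hsub : P ⊆ pvAllCells maze := by
    intro p hp
    obtain ⟨a1, a2, a3, a4⟩ := hb p hp
    exact pvMem_allCells maze p.1 p.2 a1 a2 a3 a4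
  calc P.length = P.toFinset.card := (List.toFinset_card_of_nodup hnd).symm
    _ ≤ (pvAllCells maze).toFinset.card := Finset.card_le_card (fun x hx => by
        simp only [List.mem_toFinset] at *; exact hsub hx)
    _ ≤ (pvAllCells maze).length := (pvAllCells maze).toFinset_card_le
    _ = (maze.map List.length).sum := pvAllCells_length maze

theorem pvDirs_drop (i : Nat) (h : i < 4) :
    pvDirs.drop i = pvDirs.getD i (0, 0) :: pvDirs.drop (i + 1) := by
  interval_cases i <;> rfl

theorem pvLoop_emptyStack (maze : List (List String)) (fuel : Nat) (ps : List (Int × Int)) :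
    pvLoop maze fuel ps [] = none := by
  cases fuel <;> cases ps <;> rfl

-- core simulation: scanning directions (4-j)..3 from the top frame behaves like the
-- reference findSome? and, on failure, continues as the popped machine
theorem pvSIM : ∀ (F : Nat) (maze : List (List String)) (j : Nat), j ≤ 4 →
    ∀ (r c : Int) (ps : List (Int × Int)) (is : List Nat),
    pvInv maze ((r, c) :: ps) →
    (maze.map List.length).sum + 2 ≤ F + ((r, c) :: ps).length →
    ∃ k, k ≤ kb F j ∧ ∀ rest,
      pvLoop maze (k + rest) ((r, c) :: ps) ((4 - j) :: is) =
        match (pvDirs.drop (4 - j)).findSome?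
            (fun d => pvFgB F maze ((r, c) :: ps) (r + d.1) (c + d.2)) with
        | some suf => some ((((r, c) :: ps).reverse) ++ suf)
        | none => pvLoop maze rest ps is := by
  intro F
  induction F with
  | zero =>
    intro maze j hj r c ps is hInv hF
    exfalso
    have hlen := pvInv_length maze _ hInv
    simp only [List.length_cons] at hlen hF
    omega
  | succ F ihF =>
    intro maze j hj
    induction j with
    | zero =>
      intro r c ps is hInv hF
      refine ⟨1, kb_pos _ _, fun rest => ?_⟩
      have h1 : 1 + rest = rest + 1 := by omega
      rw [h1]
      have h40 : (4 : Nat) - 0 = 4 := rfl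
      rw [h40]
      simp only [pvLoop]
      have hd4 : pvDirs.drop 4 = [] := rfl
      rw [hd4, List.findSome?_nil]
      simp
    | succ j ihj =>
      intro r c ps is hInv hF
      have hj4 : j ≤ 4 := by omega
      obtain ⟨k', hk', hrec⟩ := ihj hj4 r c ps is hInv hF
      have hilt : 4 - (j + 1) < 4 := by omega
      have hine : ¬ (4 - (j + 1) = 4) := by omega
      have hip1 : 4 - (j + 1) + 1 = 4 - j := by omega
      have hdrop := pvDirs_drop (4 - (j + 1)) hilt
      set nr := r + (pvDirs.getD (4 - (j + 1)) (0, 0)).1 with hnr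
      set nc := c + (pvDirs.getD (4 - (j + 1)) (0, 0)).2 with hnc
      by_cases hb1 : nr < 0 ∨ (maze.length : Int) ≤ nr
      · have hfgb : pvFgB (F + 1) maze ((r, c) :: ps) nr nc = none := by
          simp only [pvFgB]; rw [if_pos hb1]
        refine ⟨1 + k', by have := kb_step (F + 1) j; omega, fun rest => ?_⟩
        have h1 : 1 + k' + rest = (k' + rest) + 1 := by omega
        rw [h1]
        simp only [pvLoop]
        rw [if_neg hine, if_pos hb1, hdrop]
        simp only [List.findSome?_cons]
        rw [← hnr, ← hnc, hfgb, hip1]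
        exact hrec rest
      · by_cases hb2 : nc < 0 ∨ ((maze.getD nr.toNat []).length : Int) ≤ nc
        · have hfgb : pvFgB (F + 1) maze ((r, c) :: ps) nr nc = none := by
            simp only [pvFgB]; rw [if_neg hb1, if_pos hb2]
          refine ⟨1 + k', by have := kb_step (F + 1) j; omega, fun rest => ?_⟩
          have h1 : 1 + k' + rest = (k' + rest) + 1 := by omega
          rw [h1]
          simp only [pvLoop]
          rw [if_neg hine, if_neg hb1, if_pos hb2, hdrop]
          simp only [List.findSome?_cons]
          rw [← hnr, ← hnc, hfgb, hip1]
          exact hrec rest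
        · by_cases hb3 : (maze.getD nr.toNat []).getD nc.toNat "" = "#" ∨
              (maze.getD nr.toNat []).getD nc.toNat "" = "." ∨ (nr, nc) ∈ (r, c) :: ps
          · have hfgb : pvFgB (F + 1) maze ((r, c) :: ps) nr nc = none := by
              simp only [pvFgB]; rw [if_neg hb1, if_neg hb2, if_pos hb3]
            refine ⟨1 + k', by have := kb_step (F + 1) j; omega, fun rest => ?_⟩
            have h1 : 1 + k' + rest = (k' + rest) + 1 := by omega
            rw [h1]
            simp only [pvLoop]
            rw [if_neg hine, if_neg hb1, if_neg hb2, if_pos hb3, hdrop]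
            simp only [List.findSome?_cons]
            rw [← hnr, ← hnc, hfgb, hip1]
            exact hrec rest
          · by_cases hbG : (maze.getD nr.toNat []).getD nc.toNat "" = "G"
            · have hfgb : pvFgB (F + 1) maze ((r, c) :: ps) nr nc = some [(nr, nc)] := by
                simp only [pvFgB]; rw [if_neg hb1, if_neg hb2, if_neg hb3, if_pos hbG]
              refine ⟨1, kb_pos _ _, fun rest => ?_⟩
              have h1 : 1 + rest = rest + 1 := by omega
              rw [h1]
              simp only [pvLoop]
              rw [if_neg hine, if_neg hb1, if_neg hb2, if_neg hb3, if_pos hbG, hdrop]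
              simp only [List.findSome?_cons]
              rw [← hnr, ← hnc, hfgb]
            · -- free square: push and run the child frame (outer induction hypothesis)
              have hfree : pvFgB (F + 1) maze ((r, c) :: ps) nr nc =
                  (pvDirs.findSome? fun d =>
                    pvFgB F maze ((nr, nc) :: (r, c) :: ps) (nr + d.1) (nc + d.2)).map
                    (fun sub => (nr, nc) :: sub) := by
                simp only [pvFgB]; rw [if_neg hb1, if_neg hb2, if_neg hb3, if_neg hbG]
              have hInv2 : pvInv maze ((nr, nc) :: (r, c) :: ps) := by
                obtain ⟨hnd, hbd⟩ := hInv
                push_neg at hb1 hb2 hb3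
                refine ⟨List.nodup_cons.mpr ⟨hb3.2.2, hnd⟩, ?_⟩
                intro p hp
                rcases List.mem_cons.mp hp with hp | hp
                · subst hp
                  exact ⟨hb1.1, hb1.2, hb2.1, hb2.2⟩
                · exact hbd p hp
              obtain ⟨kc, hkc, hchild⟩ := ihF maze 4 le_rfl nr nc ((r, c) :: ps)
                ((4 - (j + 1) + 1) :: is) hInv2
                (by simp only [List.length_cons] at hF ⊢; omega)
              simp only [Nat.sub_self, List.drop_zero] at hchild
              refine ⟨1 + kc + k', ?_, fun rest => ?_⟩
              · have heq : kb (F + 1) (j + 1) = 1 + kb F 4 + kb (F + 1) j := by simp [kb]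
                omega
              · have h1 : 1 + kc + k' + rest = (kc + (k' + rest)) + 1 := by omega
                rw [h1]
                simp only [pvLoop]
                rw [if_neg hine, if_neg hb1, if_neg hb2, if_neg hb3, if_neg hbG,
                  hchild (k' + rest), hdrop]
                simp only [List.findSome?_cons]
                rw [← hnr, ← hnc, hfree]
                rcases h : pvDirs.findSome?
                    (fun d => pvFgB F maze ((nr, nc) :: (r, c) :: ps) (nr + d.1) (nc + d.2)) with
                  _ | suf
                · rw [h]
                  simp only [Option.map_none]
                  rw [hip1]
                  exact hrec rest
                · rw [h]
                  simp only [Option.map_some]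
                  simp [List.reverse_cons, List.append_assoc]

theorem pvAlt_eq_ref (maze : List (List String)) (r c : Int) :
    find_gold_alt maze (r, c) = pvFgB ((maze.map List.length).sum + 2) maze [] r c := by
  have hN : (maze.map List.length).sum + 2 = ((maze.map List.length).sum + 1) + 1 := rfl
  rw [hN]
  simp only [find_gold_alt]
  conv_rhs => rw [pvFgB]
  by_cases hb1 : r < 0 ∨ (maze.length : Int) ≤ r
  · rw [if_pos hb1, if_pos hb1]
  · rw [if_neg hb1, if_neg hb1]
    by_cases hb2 : c < 0 ∨ ((maze.getD r.toNat []).length : Int) ≤ c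
    · rw [if_pos hb2, if_pos hb2]
    · rw [if_neg hb2, if_neg hb2]
      by_cases hb3 : (maze.getD r.toNat []).getD c.toNat "" = "#" ∨
          (maze.getD r.toNat []).getD c.toNat "" = "."
      · rw [if_pos hb3, if_pos (show (maze.getD r.toNat []).getD c.toNat "" = "#" ∨
            (maze.getD r.toNat []).getD c.toNat "" = "." ∨ (r, c) ∈ ([] : List (Int × Int)) by
            tauto)]
      · rw [if_neg hb3, if_neg (show ¬ ((maze.getD r.toNat []).getD c.toNat "" = "#" ∨
            (maze.getD r.toNat []).getD c.toNat "" = "." ∨ (r, c) ∈ ([] : List (Int × Int))) by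
            push_neg at hb3 ⊢
            exact ⟨hb3.1, hb3.2, List.not_mem_nil⟩)]
        by_cases hbG : (maze.getD r.toNat []).getD c.toNat "" = "G"
        · rw [if_pos hbG, if_pos hbG]
        · rw [if_neg hbG, if_neg hbG]
          have hInv : pvInv maze [(r, c)] := by
            push_neg at hb1 hb2
            exact ⟨List.nodup_singleton _, fun p hp => by
              rcases List.mem_singleton.mp hp with rfl
              exact ⟨hb1.1, hb1.2, hb2.1, hb2.2⟩⟩
          obtain ⟨k, hk, hrun⟩ := pvSIM ((maze.map List.length).sum + 1) maze 4 le_rfl r c [] []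
            hInv (by simp)
          simp only [Nat.sub_self, List.drop_zero] at hrun
          have hkF : k ≤ 5 * 6 ^ ((maze.map List.length).sum + 1) := by
            have h1 := kb_le ((maze.map List.length).sum + 1) 4
            omega
          have hfill : k + (5 * 6 ^ ((maze.map List.length).sum + 1) - k)
              = 5 * 6 ^ ((maze.map List.length).sum + 1) := by omega
          have hrun' := hrun (5 * 6 ^ ((maze.map List.length).sum + 1) - k)
          rw [hfill] at hrun'
          rw [hrun']
          rcases h : pvDirs.findSome? (fun d =>
              pvFgB ((maze.map List.length).sum + 1) maze [(r, c)] (r + d.1) (c + d.2)) with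
            _ | suf
          · rw [h, pvLoop_emptyStack]
            simp
          · rw [h]
            simp

-- ===== VERDICT (by name: the statement is the Claim_ definition above) =====
theorem find_gold_spec : Claim_equal_find_gold := by
  intro maze position _
  unfold Spec_find_gold find_gold
  rw [(pvMain _ maze maze [] position.1 position.2 (pvR_refl maze)).1]
  exact (pvAlt_eq_ref maze position.1 position.2).symm
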